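-- pv_equiv track=rewrite | github.com/YU19993/LeetCodePractice | ValidNumber.py | findE
-- ===== SOURCE A (Python) =====
-- def findE(s: list) -> list:
--     num = 0
--     where = -1
--     for i in range(len(s)):
--         if s[i] == "e":
--             num = num + 1
--             where = i
--     return [num, where]
-- ===== SOURCE B (Python) =====
-- def findE(s: list) -> list:
--     num = s.count("e")
--     where = -1 if num == 0 else len(s) - 1 - s[::-1].index("e")
--     return [num, where]
-- ===== Notes on version B (the rewrite author's own statement) =====
-- stated objective: simpler
-- what changed: Replaces A's single index loop threading (num, where) state with two independent passes: a whole-list count and a reverse-scan index of the last 'e' (len-1-reversed.index), guarded by the count.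
import Mathlib
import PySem

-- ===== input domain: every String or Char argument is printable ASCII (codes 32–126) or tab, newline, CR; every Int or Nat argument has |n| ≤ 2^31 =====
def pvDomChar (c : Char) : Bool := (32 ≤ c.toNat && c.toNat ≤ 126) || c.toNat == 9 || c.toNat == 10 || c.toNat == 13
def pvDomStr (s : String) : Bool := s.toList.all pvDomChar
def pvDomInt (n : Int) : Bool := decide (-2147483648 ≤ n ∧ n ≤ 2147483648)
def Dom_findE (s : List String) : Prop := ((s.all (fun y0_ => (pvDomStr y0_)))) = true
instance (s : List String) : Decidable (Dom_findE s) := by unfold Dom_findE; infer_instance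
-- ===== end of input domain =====

-- B replaces A's single index loop threading (num, where) with two independent passes:
-- a count of "e" and a reverse-scan index of the last "e" (simpler decomposition).

-- ===== PORT A =====
def findE (s : List String) : List Int :=
  let p := (PySem.List.pyRange 0 (s.length : Int) 1).foldl
    (fun (st : Int × Int) (i : Int) =>
      if PySem.List.pyGetD s i "" = "e" then (st.1 + 1, i) else st)
    (0, -1)
  [p.1, p.2]

-- ===== PORT B =====
def findE_alt (s : List String) : List Int :=
  let num : Int := (PySem.List.count s "e" : Int)
  let w : Int :=
    if num = 0 then -1
    else
      match PySem.List.index? ((PySem.List.slice? s none none (-1)).getD []) "e" with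
      | some k => (s.length : Int) - 1 - (k : Int)
      | none => -1   -- unreachable: guarded by num ≠ 0 (Python would raise here)
  [num, w]

-- ===== PRECONDITION & SPEC =====
def Spec_findE (s : List String) (out : List Int) : Prop := out = findE_alt s
instance (s : List String) (out : List Int) : Decidable (Spec_findE s out) := by unfold Spec_findE; infer_instance

-- ===== CLAIM (what is proved, stated in full; the proofs are below) =====
def Claim_equal_findE : Prop := ∀ (s : List String), Dom_findE s → Spec_findE s (findE s)

-- ===== LEMMAS AND PROOFS =====

-- B's "where" value, as a standalone function of the input
def lastE (s : List String) : Int :=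
  match PySem.List.index? s.reverse "e" with
  | some k => (s.length : Int) - 1 - (k : Int)
  | none => -1

theorem lastE_append (xs : List String) (x : String) :
    lastE (xs ++ [x]) = if x = "e" then (xs.length : Int) else lastE xs := by
  unfold lastE
  rw [List.reverse_append, List.reverse_singleton]
  by_cases hx : x = "e"
  · subst hx
    rw [List.singleton_append, PySem.List.index?_cons_self]
    simp
  · rw [List.singleton_append, PySem.List.index?_cons_of_ne xs.reverse hx]
    cases h : PySem.List.index? xs.reverse "e" with
    | none => simp [hx]
    | some k =>
      simp only [hx, if_false, Option.map_some, List.length_append, List.length_cons,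
        List.length_nil]
      push_cast
      omega

theorem foldA_eq (s : List String) :
    (PySem.List.pyRange 0 (s.length : Int) 1).foldl
      (fun (st : Int × Int) (i : Int) =>
        if PySem.List.pyGetD s i "" = "e" then (st.1 + 1, i) else st)
      (0, -1) = ((s.count "e" : Int), lastE s) := by
  induction s using List.reverseRecOn with
  | nil => decide
  | append_singleton xs x ih =>
    rw [List.length_append, List.length_singleton]
    have hsplit : PySem.List.pyRange 0 ((xs.length + 1 : Nat) : Int) 1 =
        PySem.List.pyRange 0 (xs.length : Int) 1 ++ PySem.List.pyRange (xs.length : Int) ((xs.length + 1 : Nat) : Int) 1 := by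
      apply PySem.List.pyRange_one_append <;> push_cast <;> omega
    rw [hsplit, List.foldl_append]
    have hrange1 : PySem.List.pyRange (xs.length : Int) ((xs.length + 1 : Nat) : Int) 1 = [(xs.length : Int)] := by
      have : ((xs.length + 1 : Nat) : Int) = (xs.length : Int) + 1 := by push_cast; ring
      rw [this, PySem.List.pyRange_one_cons (by omega)]
      simp [PySem.List.pyRange]
    have hcongr : (PySem.List.pyRange 0 (xs.length : Int) 1).foldl
        (fun (st : Int × Int) (i : Int) =>
          if PySem.List.pyGetD (xs ++ [x]) i "" = "e" then (st.1 + 1, i) else st)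
        (0, -1) = ((xs.count "e" : Int), lastE xs) := by
      rw [PySem.List.foldl_congr_mem (g := fun (st : Int × Int) (i : Int) =>
          if PySem.List.pyGetD xs i "" = "e" then (st.1 + 1, i) else st)]
      · exact ih
      · intro acc i hi
        have hmem := (PySem.List.mem_pyRange_one).mp hi
        have h0 : 0 ≤ i := hmem.1
        have h1 : i < (xs.length : Int) := hmem.2
        rw [PySem.List.pyGetD_eq_getElem _ _ h0 (by simp; omega),
            PySem.List.pyGetD_eq_getElem _ _ h0 (by omega),
            List.getElem_append_left (by omega)]
    rw [hcongr, hrange1, List.foldl_cons, List.foldl_nil]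
    have hget : PySem.List.pyGetD (xs ++ [x]) (xs.length : Int) "" = x := by
      rw [PySem.List.pyGetD_eq_getElem _ _ (by omega) (by simp)]
      simp
    rw [hget, lastE_append, List.count_append]
    by_cases hx : x = "e"
    · simp [hx]
    · simp [hx]

theorem lastE_of_count_zero (s : List String) (h : s.count "e" = 0) : lastE s = -1 := by
  unfold lastE
  have : "e" ∉ s.reverse := by
    simp only [List.mem_reverse]
    exact (List.count_eq_zero.mp h)
  rw [(PySem.List.index?_eq_none_iff _ _).mpr this]

-- ===== VERDICT (by name: the statement is the Claim_ definition above) =====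
theorem findE_spec : Claim_equal_findE := by
  intro s _
  unfold Spec_findE findE findE_alt
  rw [foldA_eq]
  simp only [PySem.List.slice?_none_none_neg_one, Option.getD_some, PySem.List.count_eq]
  by_cases h : s.count "e" = 0
  · simp [h, lastE_of_count_zero s h]
  · have : ¬ ((s.count "e" : Int) = 0) := by exact_mod_cast h
    simp only [this, if_false, lastE]
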